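-- pv_equiv track=rewrite | github.com/razz0/DataMiningProject | src/apriori.py | generate_transaction_subsets
-- ===== SOURCE A (Python) =====
-- def generate_transaction_subsets(transaction, k):
--     """
--     Get subsets of transactions of length k
--
--     >>> generate_transaction_subsets(['A', 'B', 'C', 'D', 'E'], 4)
--     [('A', 'B', 'C', 'D'), ('A', 'B', 'C', 'E'), ('A', 'B', 'D', 'E'), ('A', 'C', 'D', 'E'), ('B', 'C', 'D', 'E')]
--
--     :param transaction: list
--     :param k: int
--     :return:
--     """
--     subsets = []
--
--     if k == 1:
--         return [(t,) for t in transaction]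
--
-- #    elif k > len(transaction):
-- #        return []
--
-- #    elif k == len(transaction):
-- #        return [tuple(transaction)]
--
--     elif k == len(transaction) - 1:
--         for i in reversed(list(range(0, len(transaction)))):
--             subset = tuple(transaction[:i] + transaction[i + 1:])
--             subsets.append(subset)
--
--     else:
--         raise Exception('Trying to generate length %s subset of %s' % (k, transaction))
-- #        for i in range(0, len(transaction) - (k - 1)):
-- #            for t in generate_transaction_subsets(transaction[i + 1:], k - 1):
-- #                subset = (transaction[i],) + t
-- #                subsets.append(subset)
--
--     return subsets
-- ===== SOURCE B (Python) =====
-- import itertools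
--
--
-- def generate_transaction_subsets(transaction, k):
--     """Get subsets of transactions of length k (only k == 1 or k == len-1 supported)."""
--     if k == 1 or k == len(transaction) - 1:
--         return list(itertools.combinations(transaction, k))
--     raise Exception('Trying to generate length %s subset of %s' % (k, transaction))
-- ===== Notes on version B (the rewrite author's own statement) =====
-- stated objective: idiomatic
-- what changed: Replaces the two hand-written branches (a size-1 comprehension plus a reversed-index loop concatenating slices) by a single itertools.combinations call, i.e. the standard combinatorial enumeration, keeping the same Exception for unsupported k.
-- outside the precondition, e.g. on generate_transaction_subsets([], -1): A returns [], B raises ValueError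
import Mathlib
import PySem

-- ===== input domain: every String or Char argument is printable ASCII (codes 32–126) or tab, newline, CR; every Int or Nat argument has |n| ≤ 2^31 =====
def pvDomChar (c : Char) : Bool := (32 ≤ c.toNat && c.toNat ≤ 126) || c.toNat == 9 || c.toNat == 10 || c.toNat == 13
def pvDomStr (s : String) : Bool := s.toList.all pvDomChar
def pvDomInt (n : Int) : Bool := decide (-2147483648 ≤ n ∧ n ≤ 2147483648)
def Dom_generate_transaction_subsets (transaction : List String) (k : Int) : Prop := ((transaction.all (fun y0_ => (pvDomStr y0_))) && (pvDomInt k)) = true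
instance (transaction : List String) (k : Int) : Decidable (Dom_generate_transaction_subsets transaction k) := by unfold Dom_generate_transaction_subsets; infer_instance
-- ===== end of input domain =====

-- B replaces A's two hand-written branches (size-1 comprehension + reversed-index deletion loop)
-- by one itertools.combinations enumeration; same Exception otherwise (idiomatic, not faster).

-- ===== PORT A =====
def generate_transaction_subsets (transaction : List String) (k : Int) : List (List String) :=
  if k = 1 then
    transaction.map (fun t => [t])
  else if k = (transaction.length : Int) - 1 then
    -- for i in reversed(range(0, len(transaction))): subsets.append(transaction[:i] + transaction[i+1:])
    (PySem.List.pyRange 0 (transaction.length : Int) 1).reverse.foldl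
      (fun subsets i =>
        subsets ++ [PySem.List.slice transaction none (some i) ++
                    PySem.List.slice transaction (some (i + 1)) none]) []
  else
    []  -- Python raises Exception here; excluded by Pre_

-- ===== PORT B =====
-- itertools.combinations transaction k, ported as the standard combinatorial recursion
-- (same positional lexicographic order as itertools.combinations).
def pyCombinations (k : Nat) (xs : List String) : List (List String) :=
  match k, xs with
  | 0, _ => [[]]
  | _ + 1, [] => []
  | j + 1, x :: rest => (pyCombinations j rest).map (fun c => x :: c) ++ pyCombinations (j + 1) rest

def generate_transaction_subsets_alt (transaction : List String) (k : Int) : List (List String) :=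
  if k = 1 ∨ k = (transaction.length : Int) - 1 then
    pyCombinations k.toNat transaction  -- negative k (only ([],-1)) raises ValueError in Python; excluded by Pre_
  else
    []  -- Python raises Exception here; excluded by Pre_

-- ===== PRECONDITION & SPEC =====
-- A raises Exception unless k == 1 or k == len(transaction)-1; additionally Pre_ excludes the
-- single input shape (empty transaction, k = -1), where A returns [] but B's
-- itertools.combinations raises ValueError (negative r).
def Pre_generate_transaction_subsets (transaction : List String) (k : Int) : Prop :=
  k = 1 ∨ (k = (transaction.length : Int) - 1 ∧ 0 ≤ k)
instance (transaction : List String) (k : Int) : Decidable (Pre_generate_transaction_subsets transaction k) := by unfold Pre_generate_transaction_subsets; infer_instance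

def pvWitness_generate_transaction_subsets : List String × Int := (["A", "B", "C"], 2)

def Spec_generate_transaction_subsets (transaction : List String) (k : Int) (out : List (List String)) : Prop := out = generate_transaction_subsets_alt transaction k
instance (transaction : List String) (k : Int) (out : List (List String)) : Decidable (Spec_generate_transaction_subsets transaction k out) := by unfold Spec_generate_transaction_subsets; infer_instance

-- ===== CLAIM (what is proved, stated in full; the proofs are below) =====
def Claim_equal_generate_transaction_subsets : Prop := ∀ (transaction : List String) (k : Int), Dom_generate_transaction_subsets transaction k → Pre_generate_transaction_subsets transaction k → Spec_generate_transaction_subsets transaction k (generate_transaction_subsets transaction k)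

-- ===== LEMMAS AND PROOFS =====

-- combinations of size 1 are the singletons, in order
theorem pyCombinations_one (xs : List String) :
    pyCombinations 1 xs = xs.map (fun t => [t]) := by
  induction xs with
  | nil => rfl
  | cons x rest ih => simp [pyCombinations, ih]

theorem pyCombinations_gt (k : Nat) (xs : List String) (h : xs.length < k) :
    pyCombinations k xs = [] := by
  induction xs generalizing k with
  | nil => cases k with | zero => omega | succ j => rfl
  | cons x rest ih =>
    cases k with
    | zero => omega
    | succ j =>
      simp only [pyCombinations]
      rw [ih j (by simpa using h), ih (j + 1) (by simp at h ⊢; omega)]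
      rfl

theorem pyCombinations_full (xs : List String) :
    pyCombinations xs.length xs = [xs] := by
  induction xs with
  | nil => rfl
  | cons x rest ih =>
    simp only [List.length_cons, pyCombinations, ih]
    rw [pyCombinations_gt (rest.length + 1) rest (by omega)]
    rfl

-- the deletion lists, in A's order (i from len-1 down to 0)
def delAll (xs : List String) : List (List String) :=
  (List.range xs.length).reverse.map (fun i => xs.take i ++ xs.drop (i + 1))

theorem delAll_cons (x : String) (rest : List String) :
    delAll (x :: rest) = (delAll rest).map (fun c => x :: c) ++ [rest] := by
  simp only [delAll, List.length_cons, List.range_succ_eq_map, List.reverse_cons,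
    List.map_append, List.map_reverse, List.map_map, List.map_cons, List.map_nil]
  congr 1

theorem pyCombinations_pred (xs : List String) (h : xs ≠ []) :
    pyCombinations (xs.length - 1) xs = delAll xs := by
  induction xs with
  | nil => exact absurd rfl h
  | cons x rest ih =>
    cases rest with
    | nil => rfl
    | cons y t =>
      have hih := ih (by simp)
      simp only [List.length_cons, Nat.add_sub_cancel] at hih ⊢
      rw [delAll_cons]
      show List.map (fun c => x :: c) (pyCombinations t.length (y :: t)) ++
          pyCombinations (t.length + 1) (y :: t) = _
      rw [hih]
      congr 1
      simpa using pyCombinations_full (y :: t)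

-- A's append-fold is a map
theorem foldl_push {α β : Type} (f : α → β) (l : List α) (acc : List β) :
    l.foldl (fun s i => s ++ [f i]) acc = acc ++ l.map f := by
  induction l generalizing acc with
  | nil => simp
  | cons x t ih => simp [List.foldl_cons, ih]

-- A's deletion branch computes delAll
theorem portA_branch (xs : List String) :
    (PySem.List.pyRange 0 (xs.length : Int) 1).reverse.foldl
      (fun subsets i =>
        subsets ++ [PySem.List.slice xs none (some i) ++
                    PySem.List.slice xs (some (i + 1)) none]) [] = delAll xs := by
  rw [foldl_push]
  rw [PySem.List.pyRange_one]
  simp only [Int.sub_zero, Int.toNat_natCast, List.map_reverse, List.map_map, List.nil_append,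
    delAll]
  congr 1
  apply List.map_congr_left
  intro i hi
  simp only [Function.comp_apply, Int.zero_add]
  rw [PySem.List.slice_to_natCast, show ((i : Int) + 1) = ((i + 1 : Nat) : Int) by push_cast; ring,
    PySem.List.slice_from_natCast]

-- ===== VERDICT (by name: the statement is the Claim_ definition above) =====
theorem generate_transaction_subsets_spec : Claim_equal_generate_transaction_subsets := by
  intro transaction k _ hpre
  unfold Spec_generate_transaction_subsets generate_transaction_subsets generate_transaction_subsets_alt
  rcases hpre with h1 | ⟨hlen, hnn⟩
  · subst h1
    simp [pyCombinations_one]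
  · by_cases h1 : k = 1
    · subst h1
      simp [pyCombinations_one]
    · rw [if_neg h1, if_pos hlen, if_pos (Or.inr hlen)]
      rw [portA_branch]
      have hne : transaction ≠ [] := by
        intro he; subst he; simp at hlen; omega
      have : k.toNat = transaction.length - 1 := by omega
      rw [this, pyCombinations_pred transaction hne]
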